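-- pv_equiv track=rewrite | github.com/Nieuwe-Warmte-Nu/code-quality-examples | src/code_quality_examples/example_3_mocks.py | create_menu_of_the_week
-- ===== SOURCE A (Python) =====
-- def create_menu_of_the_week(ingredients: list[str], number_of_the_day: int) -> list[str]:
--     menu = []
--     for line in ingredients:
--         if 'broccoli' in line:
--             menu.append('Spaghetti with broccoli sauce')
--         elif 'goat' in line:
--             menu.append('Kebab')
--         elif 'cat' in line:
--             menu.append(f'Mystery meat surprise {number_of_the_day}')
--         elif 'Tomatoes' in line:
--             menu.append('Lasagna')
--         else:
--             raise RuntimeError('Unknown ingredient in ingredients file')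
--
--     return menu
-- ===== SOURCE B (Python) =====
-- def create_menu_of_the_week(ingredients: list[str], number_of_the_day: int) -> list[str]:
--     # Rule-major staged passes: each rule sweeps the whole list once, in
--     # priority order, filling only the still-unassigned slots; priority is
--     # preserved because earlier rules run in earlier passes.
--     dishes = [None] * len(ingredients)
--     rules = [
--         ('broccoli', 'Spaghetti with broccoli sauce'),
--         ('goat', 'Kebab'),
--         ('cat', f'Mystery meat surprise {number_of_the_day}'),
--         ('Tomatoes', 'Lasagna'),
--     ]
--     for substring, dish in rules:
--         for i, line in enumerate(ingredients):
--             if dishes[i] is None and substring in line: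
--                 dishes[i] = dish
--     if any(d is None for d in dishes):
--         raise RuntimeError('Unknown ingredient in ingredients file')
--     return dishes
-- ===== Notes on version B (the rewrite author's own statement) =====
-- stated objective: alternative
-- what changed: Transposes the loop nesting: instead of A's line-major if/elif chain, B makes one whole-list pass per rule (rule-major staged passes) filling an Optional slot per line, then validates that no slot is left unassigned.
import Mathlib
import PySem

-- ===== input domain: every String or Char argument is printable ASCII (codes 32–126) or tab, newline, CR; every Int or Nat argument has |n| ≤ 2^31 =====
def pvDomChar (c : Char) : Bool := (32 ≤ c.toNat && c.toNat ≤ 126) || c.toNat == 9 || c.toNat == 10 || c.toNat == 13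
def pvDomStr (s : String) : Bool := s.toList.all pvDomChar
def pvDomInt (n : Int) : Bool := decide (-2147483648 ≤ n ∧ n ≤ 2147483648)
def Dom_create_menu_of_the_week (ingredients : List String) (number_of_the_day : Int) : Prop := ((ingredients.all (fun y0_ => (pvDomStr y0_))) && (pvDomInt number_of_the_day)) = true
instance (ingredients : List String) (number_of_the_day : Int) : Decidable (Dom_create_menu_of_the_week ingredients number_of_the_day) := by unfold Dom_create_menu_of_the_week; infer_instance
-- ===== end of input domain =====

-- B replaces A's line-major if/elif chain by rule-major staged passes over the whole list (alternative decomposition, same cost).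

-- ===== PORT A =====
-- On an unknown line Python A raises RuntimeError; the port marks that point with "" — such inputs are excluded by Pre_.
def create_menu_of_the_week (ingredients : List String) (number_of_the_day : Int) : List String :=
  ingredients.foldl (fun menu line =>
    if PySem.Str.isIn "broccoli" line then menu ++ ["Spaghetti with broccoli sauce"]
    else if PySem.Str.isIn "goat" line then menu ++ ["Kebab"]
    else if PySem.Str.isIn "cat" line then menu ++ ["Mystery meat surprise " ++ PySem.Int.toStr number_of_the_day]
    else if PySem.Str.isIn "Tomatoes" line then menu ++ ["Lasagna"]
    else menu ++ [""]) []

-- ===== PORT B =====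
def pvRules (number_of_the_day : Int) : List (String × String) :=
  [("broccoli", "Spaghetti with broccoli sauce"),
   ("goat", "Kebab"),
   ("cat", "Mystery meat surprise " ++ PySem.Int.toStr number_of_the_day),
   ("Tomatoes", "Lasagna")]

-- B's validation pass raises when a slot is still None; the port marks that point with "" — excluded by Pre_.
def create_menu_of_the_week_alt (ingredients : List String) (number_of_the_day : Int) : List String :=
  let dishes := (pvRules number_of_the_day).foldl
    (fun ds r => (ds.zip ingredients).map
      (fun x => if x.1.isNone && PySem.Str.isIn r.1 x.2 then some r.2 else x.1))
    (ingredients.map (fun _ => (none : Option String)))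
  dishes.map (fun d => d.getD "")

-- ===== PRECONDITION & SPEC =====
-- Pre_ holds exactly when every line contains a known ingredient; otherwise Python A (and B) raise RuntimeError.
def Pre_create_menu_of_the_week (ingredients : List String) (number_of_the_day : Int) : Prop :=
  ∀ line ∈ ingredients,
    (PySem.Str.isIn "broccoli" line || PySem.Str.isIn "goat" line ||
     PySem.Str.isIn "cat" line || PySem.Str.isIn "Tomatoes" line) = true
instance (ingredients : List String) (number_of_the_day : Int) : Decidable (Pre_create_menu_of_the_week ingredients number_of_the_day) := by unfold Pre_create_menu_of_the_week; infer_instance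

def pvWitness_create_menu_of_the_week : List String × Int := (["broccoli soup", "goat cheese"], 7)

def Spec_create_menu_of_the_week (ingredients : List String) (number_of_the_day : Int) (out : List String) : Prop := out = create_menu_of_the_week_alt ingredients number_of_the_day
instance (ingredients : List String) (number_of_the_day : Int) (out : List String) : Decidable (Spec_create_menu_of_the_week ingredients number_of_the_day out) := by unfold Spec_create_menu_of_the_week; infer_instance

-- ===== CLAIM (what is proved, stated in full; the proofs are below) =====
def Claim_equal_create_menu_of_the_week : Prop := ∀ (ingredients : List String) (number_of_the_day : Int), Dom_create_menu_of_the_week ingredients number_of_the_day → Pre_create_menu_of_the_week ingredients number_of_the_day → Spec_create_menu_of_the_week ingredients number_of_the_day (create_menu_of_the_week ingredients number_of_the_day)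

-- ===== LEMMAS AND PROOFS =====
-- A's fold is the map of its per-line chain.
theorem pvA_map (n : Int) (ing acc : List String) :
    ing.foldl (fun menu line =>
      if PySem.Str.isIn "broccoli" line then menu ++ ["Spaghetti with broccoli sauce"]
      else if PySem.Str.isIn "goat" line then menu ++ ["Kebab"]
      else if PySem.Str.isIn "cat" line then menu ++ ["Mystery meat surprise " ++ PySem.Int.toStr n]
      else if PySem.Str.isIn "Tomatoes" line then menu ++ ["Lasagna"]
      else menu ++ [""]) acc
    = acc ++ ing.map (fun line =>
        if PySem.Str.isIn "broccoli" line then "Spaghetti with broccoli sauce"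
        else if PySem.Str.isIn "goat" line then "Kebab"
        else if PySem.Str.isIn "cat" line then "Mystery meat surprise " ++ PySem.Int.toStr n
        else if PySem.Str.isIn "Tomatoes" line then "Lasagna"
        else "") := by
  induction ing generalizing acc with
  | nil => simp
  | cons hd tl ih =>
    simp only [List.foldl, List.map]
    rw [ih]
    split_ifs <;> simp

theorem pv_zip_map_self {α β : Type} (ing : List α) (h : α → β) :
    (ing.map h).zip ing = ing.map (fun x => (h x, x)) := by
  induction ing with
  | nil => rfl
  | cons a t ih => simp [ih]

-- One staged pass over a list in map form stays in map form.
theorem pv_pass (ing : List String) (h : String → Option String) (p d : String) :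
    ((ing.map h).zip ing).map
      (fun x => if x.1.isNone && PySem.Str.isIn p x.2 then some d else x.1)
    = ing.map (fun line => if (h line).isNone && PySem.Str.isIn p line then some d else h line) := by
  rw [pv_zip_map_self, List.map_map]
  rfl

-- B's staged passes compute the same per-line chain as A.
theorem pvB_map (ing : List String) (n : Int) :
    create_menu_of_the_week_alt ing n
    = ing.map (fun line =>
        if PySem.Str.isIn "broccoli" line then "Spaghetti with broccoli sauce"
        else if PySem.Str.isIn "goat" line then "Kebab"
        else if PySem.Str.isIn "cat" line then "Mystery meat surprise " ++ PySem.Int.toStr n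
        else if PySem.Str.isIn "Tomatoes" line then "Lasagna"
        else "") := by
  unfold create_menu_of_the_week_alt pvRules
  simp only [List.foldl]
  rw [pv_pass, pv_pass, pv_pass, pv_pass, List.map_map]
  refine List.map_congr_left (fun line _ => ?_)
  cases hb : PySem.Str.isIn "broccoli" line <;>
    cases hg : PySem.Str.isIn "goat" line <;>
      cases hc : PySem.Str.isIn "cat" line <;>
        cases ht : PySem.Str.isIn "Tomatoes" line <;>
          (simp [PySem.Str.isIn] at hb hg hc ht <;> simp [PySem.Str.isIn, hb, hg, hc, ht])

-- ===== VERDICT (by name: the statement is the Claim_ definition above) =====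
theorem create_menu_of_the_week_spec : Claim_equal_create_menu_of_the_week := by
  intro ing n _ _
  unfold Spec_create_menu_of_the_week create_menu_of_the_week
  rw [pvB_map, pvA_map]
  simp
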